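-- pv_equiv track=rewrite | github.com/yeongseon/azure-functions-openapi | src/azure_functions_openapi/swagger_ui.py | _sanitize_html_content
-- ===== SOURCE A (Python) =====
-- def _sanitize_html_content(content: str) -> str:
--     """Sanitize HTML content to prevent XSS attacks."""
--     if not content or not isinstance(content, str):
--         return "API Documentation"
--
--     # Remove potentially dangerous characters
--     dangerous_chars = ["<", ">", '"', "'", "&", "\n", "\r", "\t"]
--     sanitized = content
--     for char in dangerous_chars:
--         sanitized = sanitized.replace(char, "")
--
--     # Limit length
--     return sanitized[:100] if len(sanitized) > 100 else sanitized
-- ===== SOURCE B (Python) =====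
-- DANGEROUS = {"<", ">", '"', "'", "&", "\n", "\r", "\t"}
--
--
-- def _sanitize_html_content(content: str) -> str:
--     """Sanitize HTML content to prevent XSS attacks."""
--     if not content or not isinstance(content, str):
--         return "API Documentation"
--     sanitized = "".join(c for c in content if c not in DANGEROUS)
--     return sanitized[:100]
-- ===== Notes on version B (the rewrite author's own statement) =====
-- stated objective: idiomatic
-- what changed: Replaces eight sequential full-string .replace scans with a single membership-filtered pass over the characters, and the conditional truncation with an unconditional slice [:100].
import Mathlib
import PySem

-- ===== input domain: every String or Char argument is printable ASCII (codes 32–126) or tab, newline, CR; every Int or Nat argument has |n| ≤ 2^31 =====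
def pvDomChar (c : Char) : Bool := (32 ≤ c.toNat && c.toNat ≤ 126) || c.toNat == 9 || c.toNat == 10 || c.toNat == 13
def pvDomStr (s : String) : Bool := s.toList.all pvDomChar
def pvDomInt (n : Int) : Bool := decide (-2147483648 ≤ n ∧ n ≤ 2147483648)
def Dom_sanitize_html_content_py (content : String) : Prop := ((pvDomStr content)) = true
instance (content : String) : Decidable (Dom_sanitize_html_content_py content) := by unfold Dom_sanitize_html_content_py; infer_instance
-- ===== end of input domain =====

-- B replaces A's eight sequential full-string .replace scans with one membership-filtered
-- pass over the characters and an unconditional [:100] slice (objective: idiomatic).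

-- ===== PORT A =====
def sanitize_html_content_py (content : String) : String :=
  if content = "" then "API Documentation"
  else
    let dangerous_chars : List String := ["<", ">", "\"", "'", "&", "\n", "\r", "\t"]
    let sanitized := dangerous_chars.foldl (fun s ch => PySem.Str.replace s ch "") content
    if 100 < PySem.Str.len sanitized then PySem.Str.slice sanitized none (some 100) else sanitized

-- ===== PORT B =====
def pvDangerousB : List Char := ['<', '>', '"', '\'', '&', '\n', '\r', '\t']

def sanitize_html_content_py_alt (content : String) : String :=
  if content = "" then "API Documentation"
  else
    let sanitized := String.ofList (content.toList.filter (fun c => !(pvDangerousB.contains c)))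
    PySem.Str.slice sanitized none (some 100)

-- ===== PRECONDITION & SPEC =====
def Spec_sanitize_html_content_py (content : String) (out : String) : Prop := out = sanitize_html_content_py_alt content
instance (content : String) (out : String) : Decidable (Spec_sanitize_html_content_py content out) := by unfold Spec_sanitize_html_content_py; infer_instance

-- ===== CLAIM (what is proved, stated in full; the proofs are below) =====
def Claim_equal_sanitize_html_content_py : Prop := ∀ (content : String), Dom_sanitize_html_content_py content → Spec_sanitize_html_content_py content (sanitize_html_content_py content)

-- ===== LEMMAS AND PROOFS =====

-- Python s.replace(old, "") for a single-character old removes exactly the occurrences of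
-- that character: PySem's replace loop is a filter.
theorem pv_replace_go_single (c : Char) : ∀ (fuel : Nat) (l acc : List Char), l.length ≤ fuel →
    PySem.Chars.replace.go [c] [] fuel l acc = acc.reverse ++ l.filter (· ≠ c) := by
  intro fuel
  induction fuel with
  | zero =>
    intro l acc h
    have : l = [] := List.eq_nil_of_length_eq_zero (Nat.le_zero.mp h)
    subst this
    simp [PySem.Chars.replace.go]
  | succ n ih =>
    intro l acc h
    cases l with
    | nil => simp [PySem.Chars.replace.go]
    | cons x t =>
      by_cases hx : x = c
      · subst hx
        rw [PySem.Chars.replace.go]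
        simp only [show ([x].isPrefixOf (x :: t)) = true by simp [List.isPrefixOf], if_true]
        rw [show List.drop [x].length (x :: t) = t by simp]
        rw [ih t _ (by simpa using Nat.le_of_succ_le_succ h)]
        simp
      · rw [PySem.Chars.replace.go]
        have hpre : ([c].isPrefixOf (x :: t)) = false := by
          simp [List.isPrefixOf]
          exact fun he => absurd he.symm hx
        rw [hpre]
        simp only [Bool.false_eq_true, if_false]
        rw [ih t (x :: acc) (by simpa using Nat.le_of_succ_le_succ h)]
        simp [hx]

theorem pv_replace_single (c : Char) (l : List Char) :
    PySem.Chars.replace l [c] [] = l.filter (· ≠ c) := by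
  rw [PySem.Chars.replace]
  simp [pv_replace_go_single c l.length l [] (le_refl _)]

-- A's eight chained replaces compute the same character list as B's single filter.
theorem pv_fold_filter (content : String) :
    ((["<", ">", "\"", "'", "&", "\n", "\r", "\t"] : List String).foldl
        (fun s ch => PySem.Str.replace s ch "") content).toList
      = content.toList.filter (fun c => !(pvDangerousB.contains c)) := by
  simp only [List.foldl_cons, List.foldl_nil, PySem.Str.toList_replace,
    show ("<" : String).toList = ['<'] from rfl, show (">" : String).toList = ['>'] from rfl,
    show ("\"" : String).toList = ['"'] from rfl, show ("'" : String).toList = ['\''] from rfl,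
    show ("&" : String).toList = ['&'] from rfl, show ("\n" : String).toList = ['\n'] from rfl,
    show ("\r" : String).toList = ['\r'] from rfl, show ("\t" : String).toList = ['\t'] from rfl,
    show ("" : String).toList = [] from rfl,
    pv_replace_single, List.filter_filter]
  refine List.filter_congr (fun a _ => ?_)
  simp only [pvDangerousB, List.contains_cons, List.contains_nil]
  by_cases h1 : a = '<' <;> by_cases h2 : a = '>' <;> by_cases h3 : a = '"' <;>
    by_cases h4 : a = '\'' <;> by_cases h5 : a = '&' <;> by_cases h6 : a = '\n' <;>
    by_cases h7 : a = '\r' <;> by_cases h8 : a = '\t' <;> simp [h1, h2, h3, h4, h5, h6, h7, h8]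

theorem pv_toList_inj {a b : String} (h : a.toList = b.toList) : a = b :=
  String.toList_inj.mp h

-- ===== VERDICT (by name: the statement is the Claim_ definition above) =====
theorem sanitize_html_content_py_spec : Claim_equal_sanitize_html_content_py := by
  intro content _
  unfold Spec_sanitize_html_content_py sanitize_html_content_py sanitize_html_content_py_alt
  by_cases hc : content = ""
  · simp [hc]
  · simp only [if_neg hc]
    have hAB : (["<", ">", "\"", "'", "&", "\n", "\r", "\t"] : List String).foldl
        (fun s ch => PySem.Str.replace s ch "") content
        = String.ofList (content.toList.filter (fun c => !(pvDangerousB.contains c))) :=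
      pv_toList_inj (by rw [String.toList_ofList]; exact pv_fold_filter content)
    rw [hAB]
    set sA := String.ofList (content.toList.filter (fun c => !(pvDangerousB.contains c))) with hA
    by_cases hlen : 100 < PySem.Str.len sA
    · rw [if_pos hlen]
    · simp only [if_neg hlen]
      refine pv_toList_inj ?_ |>.symm
      rw [PySem.Str.toList_slice]
      simp only [PySem.Chars.slice_eq_listSlice]
      rw [show (100 : Int) = ((100 : Nat) : Int) from rfl, PySem.List.slice_to_natCast]
      have : sA.toList.length ≤ 100 := by
        rw [PySem.Str.len_eq] at hlen
        omega
      exact List.take_of_length_le this
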